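-- pv_equiv track=rewrite | github.com/Algorithms-and-Data-Structures-ECE/Project02 | Algo2__Sparsity_Technology_.py | findLeastMostVisitedNode
-- ===== SOURCE A (Python) =====
-- def findLeastMostVisitedNode(nodes, nodeNumber):
--     #set all node visits to 0
--     visits = [0] * nodeNumber
--
--     #update the visit for each node
--     for i in range(len(nodes)):
--         visits[nodes[i]] +=1
--
--     #(placeholder values) set the minimum and maximum as the position 0
--     min = visits[0]
--     minPositions = []
--     max = visits[0]
--     maxPositions = []
--
--     #find the actual minimum value and the position(s)
--     for i in range(nodeNumber):
--         if visits[i] < min: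
--             min = visits[i]
--             minPositions.clear()
--             minPositions = [i]
--         elif visits[i] == min:
--             minPositions.append(i)
--
--         if visits[i] > max:
--             max = visits[i]
--             maxPositions.clear()
--             maxPositions = [i]
--         elif visits[i] == max:
--             maxPositions.append(i)
--
--
--     return minPositions, min, maxPositions, max
-- ===== SOURCE B (Python) =====
-- def findLeastMostVisitedNode(nodes, nodeNumber):
--     visits = [0] * nodeNumber
--     for n in nodes:
--         visits[n] += 1
--
--     mn = min(visits)
--     mx = max(visits)
--     minPositions = [i for i in range(nodeNumber) if visits[i] == mn]
--     maxPositions = [i for i in range(nodeNumber) if visits[i] == mx]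
--     return minPositions, mn, maxPositions, mx
-- ===== Notes on version B (the rewrite author's own statement) =====
-- stated objective: simpler
-- what changed: The combined running-min/max scan with clear-and-rebuild position lists is replaced by computing min(visits)/max(visits) with the built-ins and building the position lists as filter comprehensions over range(nodeNumber).
import Mathlib
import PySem

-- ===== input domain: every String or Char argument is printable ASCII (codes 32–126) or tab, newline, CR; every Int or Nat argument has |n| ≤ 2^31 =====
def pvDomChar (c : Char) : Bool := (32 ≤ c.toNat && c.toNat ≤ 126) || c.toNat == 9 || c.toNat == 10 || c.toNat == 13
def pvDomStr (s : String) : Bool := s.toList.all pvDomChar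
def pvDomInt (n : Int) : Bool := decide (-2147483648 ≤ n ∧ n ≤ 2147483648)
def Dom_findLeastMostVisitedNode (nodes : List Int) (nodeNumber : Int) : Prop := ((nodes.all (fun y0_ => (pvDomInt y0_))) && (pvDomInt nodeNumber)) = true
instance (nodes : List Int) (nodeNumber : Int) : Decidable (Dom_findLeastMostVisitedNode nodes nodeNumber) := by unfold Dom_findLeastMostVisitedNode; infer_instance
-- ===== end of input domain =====

-- B replaces A's combined running-min/max scan by min/max built-ins plus filter comprehensions (simpler decomposition, same cost).


-- ===== PORT A =====
-- one step of A's combined scan: the min-branch (if < / elif ==) followed by the max-branch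
def pvStepMin (s : Int × List Int) (p : Int × Int) : Int × List Int :=
  if p.2 < s.1 then (p.2, [p.1]) else if p.2 = s.1 then (s.1, s.2 ++ [p.1]) else s

def pvStepMax (s : Int × List Int) (p : Int × Int) : Int × List Int :=
  if p.2 > s.1 then (p.2, [p.1]) else if p.2 = s.1 then (s.1, s.2 ++ [p.1]) else s

def findLeastMostVisitedNode (nodes : List Int) (nodeNumber : Int) : List Int × Int × List Int × Int :=
  -- visits = [0] * nodeNumber; for i in range(len(nodes)): visits[nodes[i]] += 1
  let visits0 : List Int := List.replicate nodeNumber.toNat 0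
  let visits : List Int :=
    (PySem.List.pyRange 0 nodes.length 1).foldl
      (fun v i =>
        let idx := PySem.List.pyGetD nodes i 0
        PySem.List.pySetD v idx (PySem.List.pyGetD v idx 0 + 1)) visits0
  -- min = visits[0]; max = visits[0]; positions empty  (pyGetD is exact under Pre_: visits nonempty)
  let m0 : Int := PySem.List.pyGetD visits 0 0
  -- for i in range(nodeNumber): the two if/elif blocks update (min, minPositions) and (max, maxPositions)
  let s :=
    (PySem.List.pyRange 0 nodeNumber 1).foldl
      (fun (st : (Int × List Int) × (Int × List Int)) i =>
        let p : Int × Int := (i, PySem.List.pyGetD visits i 0)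
        (pvStepMin st.1 p, pvStepMax st.2 p))
      ((m0, []), (m0, []))
  (s.1.2, s.1.1, s.2.2, s.2.1)

-- ===== PORT B =====
def findLeastMostVisitedNode_alt (nodes : List Int) (nodeNumber : Int) : List Int × Int × List Int × Int :=
  -- visits = [0] * nodeNumber; for n in nodes: visits[n] += 1
  let visits : List Int :=
    nodes.foldl (fun v n => PySem.List.pySetD v n (PySem.List.pyGetD v n 0 + 1))
      (List.replicate nodeNumber.toNat 0)
  -- mn = min(visits); mx = max(visits)   (getD 0 totalizes; Pre_ excludes the empty case, where Python raises)
  let mn : Int := (PySem.List.min? visits (fun x => x)).getD 0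
  let mx : Int := (PySem.List.max? visits (fun x => x)).getD 0
  let minPositions := (PySem.List.pyRange 0 nodeNumber 1).filter (fun i => PySem.List.pyGetD visits i 0 == mn)
  let maxPositions := (PySem.List.pyRange 0 nodeNumber 1).filter (fun i => PySem.List.pyGetD visits i 0 == mx)
  (minPositions, mn, maxPositions, mx)

-- ===== PRECONDITION & SPEC =====
-- Pre_ excludes exactly the inputs where A raises: nodeNumber ≤ 0 (IndexError on visits[0]) and any
-- node index outside Python's wraparound range [-nodeNumber, nodeNumber) (IndexError in the counting loop).
def Pre_findLeastMostVisitedNode (nodes : List Int) (nodeNumber : Int) : Prop :=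
  1 ≤ nodeNumber ∧ ∀ n ∈ nodes, -nodeNumber ≤ n ∧ n < nodeNumber
instance (nodes : List Int) (nodeNumber : Int) : Decidable (Pre_findLeastMostVisitedNode nodes nodeNumber) := by unfold Pre_findLeastMostVisitedNode; infer_instance

def pvWitness_findLeastMostVisitedNode : List Int × Int := ([0, 1, 1, -2], 3)

def Spec_findLeastMostVisitedNode (nodes : List Int) (nodeNumber : Int) (out : List Int × Int × List Int × Int) : Prop := out = findLeastMostVisitedNode_alt nodes nodeNumber
instance (nodes : List Int) (nodeNumber : Int) (out : List Int × Int × List Int × Int) : Decidable (Spec_findLeastMostVisitedNode nodes nodeNumber out) := by unfold Spec_findLeastMostVisitedNode; infer_instance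

-- ===== CLAIM (what is proved, stated in full; the proofs are below) =====
def Claim_equal_findLeastMostVisitedNode : Prop := ∀ (nodes : List Int) (nodeNumber : Int), Dom_findLeastMostVisitedNode nodes nodeNumber → Pre_findLeastMostVisitedNode nodes nodeNumber → Spec_findLeastMostVisitedNode nodes nodeNumber (findLeastMostVisitedNode nodes nodeNumber)

-- ===== LEMMAS AND PROOFS =====

-- the counting loop preserves the length of visits
theorem pvCountLength (nodes : List Int) (init : List Int) :
    (nodes.foldl (fun v n => PySem.List.pySetD v n (PySem.List.pyGetD v n 0 + 1)) init).length
      = init.length := by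
  induction nodes generalizing init with
  | nil => rfl
  | cons n t ih => simp [List.foldl, ih, PySem.List.length_pySetD]

-- A's min-scan computes the running minimum and the positions attaining the FINAL minimum
theorem pvMinScan (l : List (Int × Int)) (mn : Int) (mnp : List Int) :
    l.foldl pvStepMin (mn, mnp) =
      ((l.map Prod.snd).foldl min mn,
       (if (l.map Prod.snd).foldl min mn = mn then mnp else []) ++
         (l.filter (fun p => p.2 = (l.map Prod.snd).foldl min mn)).map Prod.fst) := by
  induction l generalizing mn mnp with
  | nil => simp
  | cons p t ih =>
    obtain ⟨i, v⟩ := p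
    have hle := (PySem.List.foldl_min_le (t.map Prod.snd) (min mn v)).1
    simp only [List.foldl_cons, List.map_cons, List.filter_cons, pvStepMin]
    by_cases h1 : v < mn
    · have hmv : min mn v = v := by omega
      rw [if_pos h1, ih]
      simp only [hmv]
      rw [hmv] at hle
      have hne : (t.map Prod.snd).foldl min v ≠ mn := by omega
      by_cases h2 : (t.map Prod.snd).foldl min v = v
      · simp [h2, (show ¬ v = mn by omega)]
      · simp [hne, h2, Ne.symm h2]
    · by_cases h2 : v = mn
      · have hmv : min mn v = mn := by omega
        rw [if_neg h1, if_pos h2, ih]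
        subst h2
        simp only [hmv]
        by_cases h3 : (t.map Prod.snd).foldl min v = v
        · simp [h3]
        · simp [h3, Ne.symm h3]
      · have hmv : min mn v = mn := by omega
        rw [if_neg h1, if_neg h2, ih]
        simp only [hmv]
        rw [hmv] at hle
        simp [(show ¬ v = (t.map Prod.snd).foldl min mn by omega)]

-- A's max-scan, mirror statement
theorem pvMaxScan (l : List (Int × Int)) (mx : Int) (mxp : List Int) :
    l.foldl pvStepMax (mx, mxp) =
      ((l.map Prod.snd).foldl max mx,
       (if (l.map Prod.snd).foldl max mx = mx then mxp else []) ++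
         (l.filter (fun p => p.2 = (l.map Prod.snd).foldl max mx)).map Prod.fst) := by
  induction l generalizing mx mxp with
  | nil => simp
  | cons p t ih =>
    obtain ⟨i, v⟩ := p
    have hle := (PySem.List.le_foldl_max (t.map Prod.snd) (max mx v)).1
    simp only [List.foldl_cons, List.map_cons, List.filter_cons, pvStepMax]
    by_cases h1 : v > mx
    · have hmv : max mx v = v := by omega
      rw [if_pos h1, ih]
      simp only [hmv]
      rw [hmv] at hle
      have hne : (t.map Prod.snd).foldl max v ≠ mx := by omega
      by_cases h2 : (t.map Prod.snd).foldl max v = v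
      · simp [h2, (show ¬ v = mx by omega)]
      · simp [hne, h2, Ne.symm h2]
    · by_cases h2 : v = mx
      · have hmv : max mx v = mx := by omega
        rw [if_neg h1, if_pos h2, ih]
        subst h2
        simp only [hmv]
        by_cases h3 : (t.map Prod.snd).foldl max v = v
        · simp [h3]
        · simp [h3, Ne.symm h3]
      · have hmv : max mx v = mx := by omega
        rw [if_neg h1, if_neg h2, ih]
        simp only [hmv]
        rw [hmv] at hle
        simp [(show ¬ v = (t.map Prod.snd).foldl max mx by omega)]

-- the scan over indices is the scan over (index, value) pairs
theorem pvFoldPairs (V : List Int) (n : Int)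
    (init : (Int × List Int) × (Int × List Int)) :
    (PySem.List.pyRange 0 n 1).foldl
        (fun st i => (pvStepMin st.1 (i, PySem.List.pyGetD V i 0),
                      pvStepMax st.2 (i, PySem.List.pyGetD V i 0))) init
      = ((PySem.List.pyRange 0 n 1).map (fun i => (i, PySem.List.pyGetD V i 0))).foldl
          (fun st p => (pvStepMin st.1 p, pvStepMax st.2 p)) init := by
  rw [List.foldl_map]

-- ===== VERDICT (by name: the statement is the Claim_ definition above) =====
theorem findLeastMostVisitedNode_spec : Claim_equal_findLeastMostVisitedNode := by
  intro nodes nodeNumber _hDom hPre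
  obtain ⟨hN, _hRange⟩ := hPre
  unfold Spec_findLeastMostVisitedNode
  simp only [findLeastMostVisitedNode, findLeastMostVisitedNode_alt]
  -- the two counting loops compute the same visits list
  rw [PySem.List.foldl_pyRange_zero_pyGetD' nodes 0
        (fun v n => PySem.List.pySetD v n (PySem.List.pyGetD v n 0 + 1))
        (List.replicate nodeNumber.toNat 0)]
  set V : List Int :=
    nodes.foldl (fun v n => PySem.List.pySetD v n (PySem.List.pyGetD v n 0 + 1))
      (List.replicate nodeNumber.toNat 0) with hV
  have hlen : V.length = nodeNumber.toNat := by
    rw [hV, pvCountLength]; simp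
  have hNn : (V.length : Int) = nodeNumber := by rw [hlen]; omega
  obtain ⟨v0, t, hVt⟩ : ∃ v0 t, V = v0 :: t := by
    cases hV' : V with
    | nil => exfalso; rw [hV'] at hlen; simp at hlen; omega
    | cons a b => exact ⟨a, b, rfl⟩
  -- rewrite A's scan as a fold over the (index, value) pairs, then split it into two independent folds
  rw [show PySem.List.pyRange 0 nodeNumber 1 = PySem.List.pyRange 0 (V.length : Int) 1 by rw [hNn]]
  rw [pvFoldPairs V (V.length : Int)
        ((PySem.List.pyGetD V 0 0, []), (PySem.List.pyGetD V 0 0, []))]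
  set pairs : List (Int × Int) :=
    (PySem.List.pyRange 0 (V.length : Int) 1).map (fun i => (i, PySem.List.pyGetD V i 0)) with hpairs
  rw [PySem.List.foldl_prod_mk (f := pvStepMin) (g := pvStepMax)]
  have hsnd : pairs.map Prod.snd = V := by
    rw [hpairs, List.map_map]
    exact PySem.List.map_pyGetD_pyRange_zero' V 0
  -- the scanned values are exactly visits; A's initial value visits[0] is its head
  have hm0 : PySem.List.pyGetD V 0 0 = v0 := by rw [hVt]; exact PySem.List.pyGetD_zero_cons v0 t 0
  rw [pvMinScan, pvMaxScan, hsnd, hm0]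
  have hminfold : V.foldl min v0 = t.foldl min v0 := by rw [hVt]; simp
  have hmaxfold : V.foldl max v0 = t.foldl max v0 := by rw [hVt]; simp
  have hmn : (PySem.List.min? V (fun x => x)).getD 0 = V.foldl min v0 := by
    rw [hVt, PySem.List.min?_id_cons]; rw [hVt] at hminfold; simp [hminfold]
  have hmx : (PySem.List.max? V (fun x => x)).getD 0 = V.foldl max v0 := by
    rw [hVt, PySem.List.max?_id_cons]; rw [hVt] at hmaxfold; simp [hmaxfold]
  rw [hmn, hmx, hNn]
  -- the position lists: filter over the pairs = filter comprehension over the range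
  have hfilter : ∀ m : Int,
      (pairs.filter (fun p => p.2 = m)).map Prod.fst
        = (PySem.List.pyRange 0 (V.length : Int) 1).filter (fun i => PySem.List.pyGetD V i 0 == m) := by
    intro m
    rw [hpairs, List.filter_map, List.map_map]
    rw [List.filter_congr (fun i _ => by
          by_cases h : PySem.List.pyGetD V i 0 = m <;> simp [h] :
          ∀ i ∈ PySem.List.pyRange 0 (V.length : Int) 1,
            ((fun p : Int × Int => decide (p.2 = m)) ∘ fun i => (i, PySem.List.pyGetD V i 0)) i
              = (PySem.List.pyGetD V i 0 == m))]
    simp [Function.comp_def]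
  rw [hNn] at hfilter
  rw [hfilter, hfilter]
  simp
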